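-- pv_equiv track=rewrite | github.com/hkassaei/agentic-network-ops | agentic_ops_v5/tools.py | _truncate_output
-- ===== SOURCE A (Python) =====
-- _MAX_OUTPUT_BYTES = 10_240  # 10 KB
--
-- def _truncate_output(text: str, max_bytes: int = _MAX_OUTPUT_BYTES) -> str:
--     """Keep the tail (most recent lines), discard oldest lines from the top."""
--     if len(text.encode("utf-8")) <= max_bytes:
--         return text
--
--     lines = text.splitlines(keepends=True)
--     kept: list[str] = []
--     total = 0
--     for line in reversed(lines):
--         line_bytes = len(line.encode("utf-8"))
--         if total + line_bytes > max_bytes: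
--             break
--         kept.append(line)
--         total += line_bytes
--
--     kept.reverse()
--     omitted = len(lines) - len(kept)
--     prefix = f"... truncated ({omitted} older lines omitted). Use grep to narrow your search.\n"
--     return prefix + "".join(kept)
-- ===== SOURCE B (Python) =====
-- _MAX_OUTPUT_BYTES = 10_240  # 10 KB
--
-- def _truncate_output(text: str, max_bytes: int = _MAX_OUTPUT_BYTES) -> str:
--     """Keep the tail (most recent lines), discard oldest lines from the top."""
--     total = len(text.encode("utf-8"))
--     if total <= max_bytes:
--         return text
--
--     lines = text.splitlines(keepends=True)
--     # Walk FORWARD from the top, dropping oldest lines while the remaining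
--     # byte total still exceeds the budget; the kept tail is lines[dropped:].
--     dropped = 0
--     remaining = total
--     while dropped < len(lines) and remaining > max_bytes:
--         remaining -= len(lines[dropped].encode("utf-8"))
--         dropped += 1
--
--     prefix = f"... truncated ({dropped} older lines omitted). Use grep to narrow your search.\n"
--     return prefix + "".join(lines[dropped:])
-- ===== Notes on version B (the rewrite author's own statement) =====
-- stated objective: alternative
-- what changed: A accumulates kept lines walking backwards from the tail with a byte budget; B walks forward from the top, subtracting each line's byte length from the remaining total until it fits, then slices lines[dropped:].
import Mathlib
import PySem

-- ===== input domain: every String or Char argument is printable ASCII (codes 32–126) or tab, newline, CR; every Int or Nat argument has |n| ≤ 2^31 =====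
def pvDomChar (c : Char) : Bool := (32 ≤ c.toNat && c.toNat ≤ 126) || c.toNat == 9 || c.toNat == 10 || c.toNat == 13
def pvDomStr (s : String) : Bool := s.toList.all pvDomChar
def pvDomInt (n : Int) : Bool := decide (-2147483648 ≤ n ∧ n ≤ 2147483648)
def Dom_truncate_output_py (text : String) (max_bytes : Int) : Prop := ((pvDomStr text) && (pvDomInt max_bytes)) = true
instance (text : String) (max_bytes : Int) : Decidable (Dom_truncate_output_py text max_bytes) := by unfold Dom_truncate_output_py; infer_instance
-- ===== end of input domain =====

-- B replaces A's reverse greedy-accumulate loop by a forward drop loop over a running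
-- remaining-byte total (same return value; objective: alternative decomposition, not faster).
--
-- Both ports: on the Dom (ASCII) domain len(text.encode("utf-8")) equals the number of
-- characters, so byte lengths are ported as .length (exact on Dom).  Python's
-- str.splitlines(keepends=True) is ported by hand as pySplitlinesKeep (exact on the Dom
-- domain, whose only line breaks are '\n', '\r' and '\r\n'); it is the same Python builtin
-- in both A and B, so the two ports share this helper.

-- splitlines(keepends=True), restricted to breaks '\n', '\r', '\r\n' (exact on Dom)
def pySplitlinesKeepAux (cur : List Char) : List Char → List (List Char)
  | [] => if cur = [] then [] else [cur.reverse]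
  | '\r' :: '\n' :: rest => (cur.reverse ++ ['\r', '\n']) :: pySplitlinesKeepAux [] rest
  | c :: rest =>
      if c = '\n' ∨ c = '\r' then (cur.reverse ++ [c]) :: pySplitlinesKeepAux [] rest
      else pySplitlinesKeepAux (c :: cur) rest

def pySplitlinesKeep (s : List Char) : List (List Char) := pySplitlinesKeepAux [] s

-- ===== PORT A =====
-- A's loop 'for line in reversed(lines): … break' (kept built in reversed-lines order)
def aKeepLoop (max_bytes : Int) : List (List Char) → Int → List (List Char)
  | [], _ => []
  | line :: rest, total =>
      if total + (line.length : Int) > max_bytes then []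
      else line :: aKeepLoop max_bytes rest (total + (line.length : Int))

def truncate_output_py (text : String) (max_bytes : Int) : String :=
  if ((text.toList.length : Int)) ≤ max_bytes then text
  else
    let lines := pySplitlinesKeep text.toList
    let kept := aKeepLoop max_bytes lines.reverse 0
    let keptChron := kept.reverse          -- kept.reverse()
    let omitted : Int := (lines.length : Int) - (keptChron.length : Int)
    String.mk (("... truncated (".toList ++ (PySem.Int.toStr omitted).toList
      ++ " older lines omitted). Use grep to narrow your search.\n".toList)
      ++ keptChron.flatten)                -- "".join(kept)

-- ===== PORT B =====
-- B's loop 'while dropped < len(lines) and remaining > max_bytes: …' counting dropped lines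
def bDropLoop (max_bytes : Int) : List (List Char) → Int → Nat
  | [], _ => 0
  | line :: rest, remaining =>
      if remaining > max_bytes then 1 + bDropLoop max_bytes rest (remaining - (line.length : Int))
      else 0

def truncate_output_py_alt (text : String) (max_bytes : Int) : String :=
  let total : Int := (text.toList.length : Int)
  if total ≤ max_bytes then text
  else
    let lines := pySplitlinesKeep text.toList
    let dropped := bDropLoop max_bytes lines total
    String.mk (("... truncated (".toList ++ (PySem.Int.toStr (dropped : Int)).toList
      ++ " older lines omitted). Use grep to narrow your search.\n".toList)
      ++ (lines.drop dropped).flatten)     -- "".join(lines[dropped:])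

-- ===== PRECONDITION & SPEC =====
def Spec_truncate_output_py (text : String) (max_bytes : Int) (out : String) : Prop := out = truncate_output_py_alt text max_bytes
instance (text : String) (max_bytes : Int) (out : String) : Decidable (Spec_truncate_output_py text max_bytes out) := by unfold Spec_truncate_output_py; infer_instance

-- ===== CLAIM (what is proved, stated in full; the proofs are below) =====
def Claim_equal_truncate_output_py : Prop := ∀ (text : String) (max_bytes : Int), Dom_truncate_output_py text max_bytes → Spec_truncate_output_py text max_bytes (truncate_output_py text max_bytes)

-- ===== LEMMAS AND PROOFS =====

-- total byte (= char) count of a list of lines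
def linesSum (ls : List (List Char)) : Int := ((ls.map List.length).sum : Nat)

theorem linesSum_cons (l : List Char) (ls : List (List Char)) :
    linesSum (l :: ls) = (l.length : Int) + linesSum ls := by simp [linesSum]

theorem linesSum_nonneg (ls : List (List Char)) : 0 ≤ linesSum ls := Int.natCast_nonneg _

-- every line produced by splitlines(keepends=True) is nonempty
theorem splitlinesAux_ne_nil (s cur : List Char) :
    ∀ l ∈ pySplitlinesKeepAux cur s, l ≠ [] := by
  fun_induction pySplitlinesKeepAux cur s <;> simp_all

-- the kept-ends lines concatenate back to the text
theorem splitlinesAux_flatten (s cur : List Char) :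
    (pySplitlinesKeepAux cur s).flatten = cur.reverse ++ s := by
  fun_induction pySplitlinesKeepAux cur s <;> simp_all

theorem splitlines_flatten (s : List Char) : (pySplitlinesKeep s).flatten = s := by
  simpa [pySplitlinesKeep] using splitlinesAux_flatten s []

theorem splitlines_sum (s : List Char) : linesSum (pySplitlinesKeep s) = (s.length : Int) := by
  have h := congrArg List.length (splitlines_flatten s)
  simp only [List.length_flatten] at h
  simp [linesSum, ← h, List.map_map]

-- if everything fits, A keeps everything
theorem aKeep_all (m : Int) (xs : List (List Char)) (t : Int)
    (h : t + linesSum xs ≤ m) : aKeepLoop m xs t = xs := by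
  induction xs generalizing t with
  | nil => rfl
  | cons x rest ih =>
      rw [linesSum_cons] at h
      have h1 : ¬ (t + (x.length : Int) > m) := by
        have := linesSum_nonneg rest; omega
      simp only [aKeepLoop, if_neg h1]
      rw [ih _ (by omega)]

-- if A keeps everything (and there is anything), it fit
theorem aKeep_all_le (m : Int) (xs : List (List Char)) (t : Int)
    (hne : xs ≠ []) (h : aKeepLoop m xs t = xs) : t + linesSum xs ≤ m := by
  induction xs generalizing t with
  | nil => exact absurd rfl hne
  | cons x rest ih =>
      simp only [aKeepLoop] at h
      by_cases hc : t + (x.length : Int) > m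
      · rw [if_pos hc] at h
        exact absurd h (by simp)
      · rw [if_neg hc] at h
        have h2 : aKeepLoop m rest (t + (x.length : Int)) = rest := by injection h
        rw [linesSum_cons]
        rcases eq_or_ne rest [] with hr | hr
        · subst hr
          simp only [linesSum, List.map_nil, List.sum_nil, Nat.cast_zero, add_zero]
          omega
        · have := ih (t + (x.length : Int)) hr h2
          omega

theorem aKeep_append (m : Int) (xs ys : List (List Char)) (t : Int) :
    aKeepLoop m (xs ++ ys) t =
      if aKeepLoop m xs t = xs then xs ++ aKeepLoop m ys (t + linesSum xs)
      else aKeepLoop m xs t := by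
  induction xs generalizing t with
  | nil => simp [aKeepLoop, linesSum]
  | cons x rest ih =>
      by_cases hc : t + (x.length : Int) > m
      · have hx : aKeepLoop m (x :: rest) t = [] := by
          simp [aKeepLoop, if_pos hc]
        have hne : aKeepLoop m (x :: rest) t ≠ x :: rest := by
          rw [hx]; exact (List.cons_ne_nil _ _).symm
        rw [if_neg hne, List.cons_append]
        simp [aKeepLoop, if_pos hc]
      · have hx : aKeepLoop m (x :: rest) t = x :: aKeepLoop m rest (t + (x.length : Int)) := by
          simp [aKeepLoop, if_neg hc]
        have hxa : aKeepLoop m ((x :: rest) ++ ys) t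
            = x :: aKeepLoop m (rest ++ ys) (t + (x.length : Int)) := by
          simp [aKeepLoop, if_neg hc]
        rw [hxa, ih, hx]
        by_cases h2 : aKeepLoop m rest (t + (x.length : Int)) = rest
        · rw [if_pos h2, if_pos (by rw [h2]), linesSum_cons]
          simp [add_assoc]
        · rw [if_neg h2, if_neg (by intro hcon; exact h2 (by injection hcon))]

theorem bDrop_le (m : Int) (ls : List (List Char)) (r : Int) :
    bDropLoop m ls r ≤ ls.length := by
  induction ls generalizing r with
  | nil => simp [bDropLoop]
  | cons x rest ih =>
      simp only [bDropLoop]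
      split_ifs
      · simpa [Nat.add_comm] using Nat.add_le_add_right (ih _) 1
      · simp

-- MAIN: the forward drop count and the reverse greedy keep cut at the same line
theorem main_cut (m : Int) (ls : List (List Char)) (h1 : ∀ l ∈ ls, l ≠ []) :
    (aKeepLoop m ls.reverse 0).reverse = ls.drop (bDropLoop m ls (linesSum ls)) := by
  induction ls with
  | nil => rfl
  | cons l rest ih =>
      have h1r : ∀ x ∈ rest, x ≠ [] := fun x hx => h1 x (List.mem_cons_of_mem _ hx)
      have hlpos : (0:Int) < l.length := by
        have hl := h1 l (List.mem_cons_self)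
        have : l.length ≠ 0 := fun h => hl (List.eq_nil_of_length_eq_zero h)
        omega
      simp only [List.reverse_cons, linesSum_cons, bDropLoop]
      by_cases hbig : (l.length : Int) + linesSum rest > m
      · rw [if_pos hbig]
        have harith : (l.length : Int) + linesSum rest - (l.length : Int) = linesSum rest := by ring
        rw [harith, aKeep_append]
        by_cases hall : aKeepLoop m rest.reverse 0 = rest.reverse
        · -- all of rest is kept; then rest fit (or rest = []), and l breaks the loop
          rw [if_pos hall]
          have hsum : linesSum rest ≤ m ∨ rest = [] := by
            rcases eq_or_ne rest [] with hr | hr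
            · exact Or.inr hr
            · left
              have := aKeep_all_le m rest.reverse 0 (by simpa using hr) hall
              simpa [linesSum, List.map_reverse] using this
          have hrevsum : linesSum rest.reverse = linesSum rest := by
            simp [linesSum, List.map_reverse]
          have hbreak : aKeepLoop m [l] (0 + linesSum rest.reverse) = [] := by
            simp only [aKeepLoop, hrevsum]
            rw [if_pos (by omega)]
          rw [hbreak]
          rcases hsum with hle | hr
          · have hstop : bDropLoop m rest (linesSum rest) = 0 := by
              cases rest with
              | nil => rfl
              | cons y ys => simp only [bDropLoop]; rw [if_neg (by omega)]
            rw [hstop]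
            simp
          · subst hr; simp [bDropLoop]
        · -- rest is not all kept: both sides recurse in step
          rw [if_neg hall, ih h1r, Nat.add_comm, List.drop_succ_cons]
      · -- everything fits: A keeps all, B drops none
        rw [if_neg hbig]
        have hall : aKeepLoop m (rest.reverse ++ [l]) 0 = rest.reverse ++ [l] := by
          apply aKeep_all
          have : linesSum (rest.reverse ++ [l]) = (l.length : Int) + linesSum rest := by
            simp [linesSum, List.map_reverse]; ring
          omega
        rw [hall]
        simp

-- ===== VERDICT (by name: the statement is the Claim_ definition above) =====
theorem truncate_output_py_spec : Claim_equal_truncate_output_py := by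
  intro text m _
  show truncate_output_py text m = truncate_output_py_alt text m
  unfold truncate_output_py truncate_output_py_alt
  by_cases h : ((text.toList.length : Int)) ≤ m
  · rw [if_pos h, if_pos h]
  · rw [if_neg h, if_neg h]
    have hne : ∀ l ∈ pySplitlinesKeep text.toList, l ≠ [] :=
      splitlinesAux_ne_nil text.toList []
    have hsum := splitlines_sum text.toList
    have hmain := main_cut m (pySplitlinesKeep text.toList) hne
    rw [← hsum]
    set ls := pySplitlinesKeep text.toList with hls
    set d := bDropLoop m ls (linesSum ls) with hd
    have hdle : d ≤ ls.length := bDrop_le m ls (linesSum ls)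
    simp only [hmain, ← hd, List.length_drop]
    have homit : (ls.length : Int) - ((ls.length - d : Nat) : Int) = (d : Int) := by
      push_cast [Nat.cast_sub hdle]; ring
    rw [homit]
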